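-- pv_equiv track=rewrite | github.com/qvizt/HackerRank-Solutions-Java | Python/Algorithms/Greedy/Luck Balance.py | get_maximum_luck
-- ===== SOURCE A (Python) =====
-- def get_maximum_luck(contests, loss_count):
--     luck_values = []
--     maximum_luck = 0
--
--     for c in contests:
--         luck = c[0]
--         rating = c[1]
--
--         if rating == 1:
--             luck_values.append(luck)
--         else:
--             maximum_luck += luck
--
--     luck_values.sort()
--     limit = max(len(luck_values) - loss_count, 0)
--
--     for i in range(0, limit):
--         maximum_luck -= luck_values[i]
--
--     for i in range(limit, len(luck_values)):
--         maximum_luck += luck_values[i]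
--
--     return maximum_luck
-- ===== SOURCE B (Python) =====
-- def _sum_smallest(xs, k):
--     # sum of the k smallest elements of xs (quickselect-style partitioning)
--     if k <= 0:
--         return 0
--     if k >= len(xs):
--         return sum(xs)
--     pivot = xs[len(xs) // 2]
--     lt = [x for x in xs if x < pivot]
--     eq = [x for x in xs if x == pivot]
--     gt = [x for x in xs if x > pivot]
--     if k <= len(lt):
--         return _sum_smallest(lt, k)
--     if k <= len(lt) + len(eq):
--         return sum(lt) + pivot * (k - len(lt))
--     return sum(lt) + sum(eq) + _sum_smallest(gt, k - len(lt) - len(eq))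
--
--
-- def get_maximum_luck(contests, loss_count):
--     base = sum(c[0] for c in contests if c[1] != 1)
--     important = [c[0] for c in contests if c[1] == 1]
--     limit = max(len(important) - loss_count, 0)
--     return base + sum(important) - 2 * _sum_smallest(important, limit)
-- ===== Notes on version B (the rewrite author's own statement) =====
-- stated objective: alternative
-- what changed: A builds the list of important lucks in a loop, fully sorts it and walks index ranges subtracting/adding; B computes the unimportant and important sums by comprehensions and gets the sum of the k smallest important lucks with a quickselect-style recursive partition (no full sort, closed-form combination).
import Mathlib
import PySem

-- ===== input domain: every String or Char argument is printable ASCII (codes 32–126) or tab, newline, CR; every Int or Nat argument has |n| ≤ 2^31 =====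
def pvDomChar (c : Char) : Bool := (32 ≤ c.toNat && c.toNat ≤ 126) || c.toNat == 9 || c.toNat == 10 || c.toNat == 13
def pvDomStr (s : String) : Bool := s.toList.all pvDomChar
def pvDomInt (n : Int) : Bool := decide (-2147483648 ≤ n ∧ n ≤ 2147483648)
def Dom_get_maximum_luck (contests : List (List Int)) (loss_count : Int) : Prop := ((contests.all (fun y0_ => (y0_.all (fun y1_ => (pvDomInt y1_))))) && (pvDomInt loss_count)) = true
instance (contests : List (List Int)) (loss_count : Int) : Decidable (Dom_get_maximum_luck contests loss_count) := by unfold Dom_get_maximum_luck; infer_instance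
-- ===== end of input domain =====

-- B replaces A's full sort + two index loops by a quickselect-style recursive partition summing the k smallest important lucks, combined in closed form (alternative algorithm; not measurably faster in a timing run).


-- ===== PORT A =====
def get_maximum_luck (contests : List (List Int)) (loss_count : Int) : Int :=
  let st := contests.foldl (fun (st : List Int × Int) c =>
      let luck := PySem.List.pyGetD c 0 0
      let rating := PySem.List.pyGetD c 1 0
      if rating = 1 then (st.1 ++ [luck], st.2) else (st.1, st.2 + luck))
    ([], 0)
  let lv := PySem.List.sorted st.1 (fun x => x) false
  let limit : Int := max ((lv.length : Int) - loss_count) 0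
  let m1 := (PySem.List.pyRange 0 limit 1).foldl (fun m i => m - PySem.List.pyGetD lv i 0) st.2
  (PySem.List.pyRange limit (lv.length : Int) 1).foldl (fun m i => m + PySem.List.pyGetD lv i 0) m1

-- ===== PORT B =====
-- quickselect-style sum of the k smallest elements of xs
def pySumSmallest (xs : List Int) (k : Int) : Int :=
  if k ≤ 0 then 0
  else if (xs.length : Int) ≤ k then xs.sum
  else
    let pivot := xs.getD (xs.length / 2) 0
    let lt := xs.filter (fun x => x < pivot)
    let eq := xs.filter (fun x => x = pivot)
    let gt := xs.filter (fun x => pivot < x)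
    if k ≤ (lt.length : Int) then pySumSmallest lt k
    else if k ≤ (lt.length : Int) + (eq.length : Int) then
      lt.sum + pivot * (k - (lt.length : Int))
    else lt.sum + eq.sum + pySumSmallest gt (k - (lt.length : Int) - (eq.length : Int))
termination_by xs.length
decreasing_by
  all_goals
  · have hlen : xs.length / 2 < xs.length := by omega
    have hmem : xs.getD (xs.length / 2) 0 ∈ xs := by
      rw [List.getD_eq_getElem xs 0 hlen]; exact List.getElem_mem hlen
    rw [List.length_unattach]
    calc (List.filter _ xs.attach).length < xs.attach.length := by
          refine List.length_filter_lt_length_iff_exists.mpr ⟨⟨_, hmem⟩, List.mem_attach _ _, by simp⟩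
      _ = xs.length := List.length_attach

def get_maximum_luck_alt (contests : List (List Int)) (loss_count : Int) : Int :=
  let base := ((contests.filter (fun c => PySem.List.pyGetD c 1 0 ≠ 1)).map
      (fun c => PySem.List.pyGetD c 0 0)).sum
  let important := (contests.filter (fun c => PySem.List.pyGetD c 1 0 = 1)).map
      (fun c => PySem.List.pyGetD c 0 0)
  let limit : Int := max ((important.length : Int) - loss_count) 0
  base + important.sum - 2 * pySumSmallest important limit

-- ===== PRECONDITION & SPEC =====
-- Pre_ excludes exactly the inputs where A raises IndexError: a contest entry with
-- fewer than two fields (c[0]/c[1]), or a negative loss_count (then limit exceeds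
-- len(luck_values) and the first index loop runs out of range).
def Pre_get_maximum_luck (contests : List (List Int)) (loss_count : Int) : Prop :=
  0 ≤ loss_count ∧ ∀ c ∈ contests, 2 ≤ c.length
instance (contests : List (List Int)) (loss_count : Int) : Decidable (Pre_get_maximum_luck contests loss_count) := by unfold Pre_get_maximum_luck; infer_instance

def pvWitness_get_maximum_luck : List (List Int) × Int := ([[5, 1], [3, 0], [1, 1]], 1)

def Spec_get_maximum_luck (contests : List (List Int)) (loss_count : Int) (out : Int) : Prop := out = get_maximum_luck_alt contests loss_count
instance (contests : List (List Int)) (loss_count : Int) (out : Int) : Decidable (Spec_get_maximum_luck contests loss_count out) := by unfold Spec_get_maximum_luck; infer_instance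

-- ===== CLAIM (what is proved, stated in full; the proofs are below) =====
def Claim_equal_get_maximum_luck : Prop := ∀ (contests : List (List Int)) (loss_count : Int), Dom_get_maximum_luck contests loss_count → Pre_get_maximum_luck contests loss_count → Spec_get_maximum_luck contests loss_count (get_maximum_luck contests loss_count)

-- ===== LEMMAS AND PROOFS =====

theorem part_perm (xs : List Int) (p : Int) :
    (xs.filter (fun x => decide (x < p)) ++ (xs.filter (fun x => decide (x = p)) ++ xs.filter (fun x => decide (p < x)))).Perm xs := by
  refine (List.perm_iff_count).mpr (fun a => ?_)
  have z : ∀ q : Int → Bool, q a = false → List.count a (xs.filter q) = 0 := by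
    intro q hq
    rw [List.count_eq_zero]
    intro hmem
    rw [List.mem_filter, hq] at hmem
    exact absurd hmem.2 (by simp)
  have c : ∀ q : Int → Bool, q a = true → List.count a (xs.filter q) = List.count a xs := by
    intro q hq
    exact List.count_filter hq
  simp only [List.count_append]
  rcases lt_trichotomy a p with h | h | h
  · rw [c _ (by simpa using h), z _ (by simp [ne_of_lt h]), z _ (by simp [not_lt.mpr h.le])]; omega
  · rw [z _ (by simp [h]), c _ (by simpa using h), z _ (by simp [h])]; omega
  · rw [z _ (by simp [not_lt.mpr h.le]), z _ (by simp [ne_of_gt h]), c _ (by simpa using h)]; omega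
theorem sorted_decomp (xs : List Int) (p : Int) :
    PySem.List.sorted xs (fun x => x) false =
      PySem.List.sorted (xs.filter (fun x => decide (x < p))) (fun x => x) false ++
      (xs.filter (fun x => decide (x = p)) ++
       PySem.List.sorted (xs.filter (fun x => decide (p < x))) (fun x => x) false) := by
  refine PySem.List.sorted_id_eq_of_perm_of_pairwise _ _ ?_ ?_
  · exact ((PySem.List.sorted_perm _ _ _).append ((List.Perm.refl _).append (PySem.List.sorted_perm _ _ _))).trans (part_perm xs p)
  · rw [List.pairwise_append, List.pairwise_append]
    refine ⟨PySem.List.sorted_pairwise _ _, ⟨?_, PySem.List.sorted_pairwise _ _, ?_⟩, ?_⟩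
    · refine List.pairwise_of_forall_mem_list (fun a ha b hb => ?_)
      simp only [List.mem_filter, decide_eq_true_eq] at ha hb; omega
    · intro a ha b hb
      rw [List.mem_filter] at ha
      rw [PySem.List.mem_sorted, List.mem_filter] at hb
      simp only [decide_eq_true_eq] at ha hb; omega
    · intro a ha b hb
      rw [PySem.List.mem_sorted, List.mem_filter] at ha
      rw [List.mem_append, List.mem_filter, PySem.List.mem_sorted, List.mem_filter] at hb
      simp only [decide_eq_true_eq] at ha hb; omega

theorem quickselect_sum : ∀ (n : Nat) (xs : List Int) (k : Nat), xs.length ≤ n → k ≤ xs.length →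
    pySumSmallest xs (k : Int) = ((PySem.List.sorted xs (fun x => x) false).take k).sum := by
  intro n
  induction n with
  | zero =>
    intro xs k h1 h2
    have hk : k = 0 := by omega
    rw [pySumSmallest.eq_def]
    simp [hk]
  | succ n ih =>
    intro xs k h1 h2
    rw [pySumSmallest.eq_def]
    by_cases hk0 : (k : Int) ≤ 0
    · have : k = 0 := by omega
      simp [this]
    by_cases hkl : (xs.length : Int) ≤ (k : Int)
    · have hk : k = xs.length := by omega
      rw [if_neg hk0, if_pos hkl, List.take_of_length_le (by rw [PySem.List.length_sorted]; omega)]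
      exact ((PySem.List.sorted_perm _ _ _).sum_eq).symm
    rw [if_neg hk0, if_neg hkl]
    set p := xs.getD (xs.length / 2) 0 with hp
    have hdec := sorted_decomp xs p
    have hperm := part_perm xs p
    have hlensum : (xs.filter (fun x => decide (x < p))).length +
        ((xs.filter (fun x => decide (x = p))).length + (xs.filter (fun x => decide (p < x))).length) = xs.length := by
      simpa using hperm.length_eq
    set lt := xs.filter (fun x => decide (x < p)) with hlt
    set eqq := xs.filter (fun x => decide (x = p)) with heqq
    set gt := xs.filter (fun x => decide (p < x)) with hgt
    have hpmem : p ∈ xs := by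
      have hlen2 : xs.length / 2 < xs.length := by omega
      rw [hp, List.getD_eq_getElem xs 0 hlen2]; exact List.getElem_mem hlen2
    have heqpos : 0 < eqq.length :=
      List.length_pos_of_mem (by rw [heqq, List.mem_filter]; exact ⟨hpmem, by simp⟩)
    have hltlen : lt.length < xs.length := by omega
    have hgtlen : gt.length < xs.length := by omega
    by_cases h1' : (k : Int) ≤ (lt.length : Int)
    · rw [if_pos h1', ih lt k (by omega) (by omega), hdec,
        List.take_append_of_le_length (by rw [PySem.List.length_sorted]; omega)]
    rw [if_neg h1']
    have htake : ((PySem.List.sorted xs (fun x => x) false).take k) =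
        PySem.List.sorted lt (fun x => x) false ++
        ((eqq ++ PySem.List.sorted gt (fun x => x) false).take (k - lt.length)) := by
      rw [hdec, List.take_append,
        List.take_of_length_le (by rw [PySem.List.length_sorted]; omega), PySem.List.length_sorted]
    have hsumlt : (PySem.List.sorted lt (fun x => x) false).sum = lt.sum :=
      (PySem.List.sorted_perm _ _ _).sum_eq
    have heqrep : eqq = List.replicate eqq.length p := by
      refine List.eq_replicate_of_mem (fun b hb => ?_)
      rw [heqq, List.mem_filter] at hb
      simpa using hb.2
    by_cases h2' : (k : Int) ≤ (lt.length : Int) + (eqq.length : Int)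
    · rw [if_pos h2', htake, List.sum_append, hsumlt,
        List.take_append_of_le_length (by simp; omega)]
      rw [heqrep, List.take_replicate, List.sum_replicate, min_eq_left (by simp; omega)]
      rw [← hlt, nsmul_eq_mul, Nat.cast_sub (by omega)]
      ring
    · rw [if_neg h2', htake, List.sum_append]
      rw [List.take_append, List.take_of_length_le (by omega), List.sum_append, hsumlt]
      have : ((k : Int) - (lt.length : Int) - (eqq.length : Int)) = ((k - lt.length - eqq.length : Nat) : Int) := by omega
      rw [this, ih gt (k - lt.length - eqq.length) (by omega) (by omega)]
      rw [← hlt, ← heqq]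
      ring

theorem foldA (contests : List (List Int)) : ∀ (acc : List Int × Int),
    contests.foldl (fun (st : List Int × Int) c =>
      let luck := PySem.List.pyGetD c 0 0
      let rating := PySem.List.pyGetD c 1 0
      if rating = 1 then (st.1 ++ [luck], st.2) else (st.1, st.2 + luck)) acc =
    (acc.1 ++ (contests.filter (fun c => PySem.List.pyGetD c 1 0 = 1)).map (fun c => PySem.List.pyGetD c 0 0),
     acc.2 + ((contests.filter (fun c => PySem.List.pyGetD c 1 0 ≠ 1)).map (fun c => PySem.List.pyGetD c 0 0)).sum) := by
  induction contests with
  | nil => intro acc; simp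
  | cons c cs ih =>
    intro acc
    simp only [List.foldl_cons, List.filter_cons]
    by_cases hc : PySem.List.pyGetD c 1 0 = 1
    · simp [hc, ih, List.append_assoc]
    · simp [hc, ih]
      ring

theorem loop1 (s : List Int) : ∀ (L : Nat) (init : Int), L ≤ s.length →
    (PySem.List.pyRange 0 (L : Int) 1).foldl (fun m i => m - PySem.List.pyGetD s i 0) init =
      init - (s.take L).sum := by
  intro L
  induction L with
  | zero => intro init h; simp [PySem.List.pyRange_one_eq_nil]
  | succ L ih =>
    intro init h
    have hcast : ((L + 1 : Nat) : Int) = (L : Int) + 1 := by push_cast; ring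
    rw [hcast, PySem.List.pyRange_one_succ_right (by positivity), List.foldl_append, ih init (by omega)]
    have hL : L < s.length := by omega
    simp only [List.foldl_cons, List.foldl_nil, PySem.List.pyGetD_natCast]
    rw [List.getD_eq_getElem s 0 hL, List.take_add_one, List.sum_append,
      List.getElem?_eq_getElem hL]
    simp
    ring

theorem foldl_add_sum (l : List Int) : ∀ init : Int, l.foldl (fun m x => m + x) init = init + l.sum := by
  induction l with
  | nil => simp
  | cons x t ih => intro init; rw [List.foldl_cons, ih, List.sum_cons]; ring

theorem loop2 (s : List Int) (a : Int) (init : Int) (ha : 0 ≤ a) :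
    (PySem.List.pyRange a (s.length : Int) 1).foldl (fun m i => m + PySem.List.pyGetD s i 0) init =
      init + (s.drop a.toNat).sum := by
  have h := PySem.List.foldl_pyRange_pyGetD s 0 (fun m x => m + x) init ha
  rw [show (s.length : Int) = PySem.List.len s from by simp [PySem.List.len_eq], h, foldl_add_sum]

-- ===== VERDICT (by name: the statement is the Claim_ definition above) =====
theorem get_maximum_luck_spec : Claim_equal_get_maximum_luck := by
  intro contests lc hdom hpre
  obtain ⟨hlc, hlen2⟩ := hpre
  unfold Spec_get_maximum_luck
  show get_maximum_luck contests lc = get_maximum_luck_alt contests lc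
  simp only [get_maximum_luck, get_maximum_luck_alt]
  rw [foldA contests ([], 0)]
  simp only [List.nil_append, zero_add]
  set impl := (contests.filter (fun c => decide (PySem.List.pyGetD c 1 0 = 1))).map (fun c => PySem.List.pyGetD c 0 0) with himpl
  set base := ((contests.filter (fun c => decide (PySem.List.pyGetD c 1 0 ≠ 1))).map (fun c => PySem.List.pyGetD c 0 0)).sum with hbase
  set s := PySem.List.sorted impl (fun x => x) false with hs
  have hslen : s.length = impl.length := PySem.List.length_sorted _ _ _
  set limit : Int := max ((s.length : Int) - lc) 0 with hlimit
  have h0 : 0 ≤ limit := le_max_right _ _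
  have hle : limit ≤ (s.length : Int) := by
    rw [hlimit]; omega
  have hL : limit = ((limit.toNat : Nat) : Int) := (Int.toNat_of_nonneg h0).symm
  have hLle : limit.toNat ≤ s.length := by omega
  have hBlim : max ((impl.length : Int) - lc) 0 = limit := by rw [hlimit, hslen]
  rw [hBlim, hL, loop1 s limit.toNat base hLle,
    loop2 s ((limit.toNat : Nat) : Int) (base - (s.take limit.toNat).sum) (by positivity),
    quickselect_sum impl.length impl limit.toNat le_rfl (by rw [← hslen]; omega), ← hs]
  have hsum : s.sum = impl.sum := (PySem.List.sorted_perm _ _ _).sum_eq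
  have hsplit : (s.take limit.toNat).sum + (s.drop limit.toNat).sum = s.sum :=
    List.sum_take_add_sum_drop _ _
  have htn : ((limit.toNat : Nat) : Int).toNat = limit.toNat := by omega
  rw [htn]
  omega
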